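-- pv_equiv track=rewrite | github.com/Open-Source-Dashboard/OSD-backend | osd_dashboard_app/views.py | prioritize_hacktoberfest_repos
-- ===== SOURCE A (Python) =====
-- def prioritize_hacktoberfest_repos(repositories):
--     """Prioritize Hacktoberfest repositories.
--
--     This function takes a list of GitHub repositories and prioritizes repositories that have the 'hacktoberfest' topic. It returns a new list with Hacktoberfest repositories followed by other repositories.
--
--     Args:
--         repositories (list): A list of GitHub repositories.
--
--     Returns:
--         list: A list of GitHub repositories with Hacktoberfest repositories prioritized.
--     """
--     hacktoberfest_repos = []
--     other_repos = []
--     for repo in repositories: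
--         if 'hacktoberfest' in repo['topics']:
--             hacktoberfest_repos.append(repo)
--
--         else:
--             other_repos.append(repo)
--     return hacktoberfest_repos + other_repos
-- ===== SOURCE B (Python) =====
-- def prioritize_hacktoberfest_repos(repositories):
--     """Hacktoberfest-topic repos first, via one stable sort on a boolean key."""
--     return sorted(repositories, key=lambda repo: 'hacktoberfest' not in repo['topics'])
-- ===== Notes on version B (the rewrite author's own statement) =====
-- stated objective: idiomatic
-- what changed: Replaces the two-accumulator dispatch loop plus list concatenation with a single stable sort on the boolean key 'hacktoberfest' not in repo['topics'], whose stability reproduces the partition order.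
import Mathlib
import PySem

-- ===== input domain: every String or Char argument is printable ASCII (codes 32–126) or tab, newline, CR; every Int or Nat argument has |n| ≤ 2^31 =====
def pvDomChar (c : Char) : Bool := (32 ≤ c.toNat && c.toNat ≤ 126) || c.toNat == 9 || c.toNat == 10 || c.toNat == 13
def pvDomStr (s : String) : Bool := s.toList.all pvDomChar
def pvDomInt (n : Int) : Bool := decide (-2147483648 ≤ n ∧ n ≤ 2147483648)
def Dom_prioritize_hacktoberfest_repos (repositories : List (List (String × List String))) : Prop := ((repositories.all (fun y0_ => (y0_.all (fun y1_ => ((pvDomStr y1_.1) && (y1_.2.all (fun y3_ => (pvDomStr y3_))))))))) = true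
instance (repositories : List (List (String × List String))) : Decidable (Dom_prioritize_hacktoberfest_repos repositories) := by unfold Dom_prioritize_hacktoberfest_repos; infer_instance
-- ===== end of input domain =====

-- B replaces A's two-accumulator partition loop with a single stable sort on a boolean key (same cost class in practice, more idiomatic).


-- shared helper: repo['topics'] (first-match dict lookup; the default [] is never reached inside Pre_)
def pvTopics (repo : List (String × List String)) : List String :=
  ((PySem.Dict.mk repo).get? "topics").getD []

-- ===== PORT A =====
def prioritize_hacktoberfest_repos (repositories : List (List (String × List String))) : List (List (String × List String)) :=
  let st := repositories.foldl
    (fun (acc : List (List (String × List String)) × List (List (String × List String))) repo =>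
      if (pvTopics repo).contains "hacktoberfest" then (acc.1 ++ [repo], acc.2)
      else (acc.1, acc.2 ++ [repo]))
    ([], [])
  st.1 ++ st.2

-- ===== PORT B =====
def prioritize_hacktoberfest_repos_alt (repositories : List (List (String × List String))) : List (List (String × List String)) :=
  PySem.List.sorted repositories (fun repo => !(pvTopics repo).contains "hacktoberfest") false

-- ===== PRECONDITION & SPEC =====
-- Pre_ excludes repos without a 'topics' key, on which A raises KeyError (B raises too).
def Pre_prioritize_hacktoberfest_repos (repositories : List (List (String × List String))) : Prop :=
  (repositories.all (fun repo => (PySem.Dict.mk repo).contains "topics")) = true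
instance (repositories : List (List (String × List String))) : Decidable (Pre_prioritize_hacktoberfest_repos repositories) := by unfold Pre_prioritize_hacktoberfest_repos; infer_instance
def pvWitness_prioritize_hacktoberfest_repos : (List (List (String × List String))) :=
  [[("topics", ["hacktoberfest", "api"]), ("name", ["osd"])], [("topics", ["web"])], [("topics", [])]]

def Spec_prioritize_hacktoberfest_repos (repositories : List (List (String × List String))) (out : List (List (String × List String))) : Prop := out = prioritize_hacktoberfest_repos_alt repositories
instance (repositories : List (List (String × List String))) (out : List (List (String × List String))) : Decidable (Spec_prioritize_hacktoberfest_repos repositories out) := by unfold Spec_prioritize_hacktoberfest_repos; infer_instance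

-- ===== CLAIM (what is proved, stated in full; the proofs are below) =====
def Claim_equal_prioritize_hacktoberfest_repos : Prop := ∀ (repositories : List (List (String × List String))), Dom_prioritize_hacktoberfest_repos repositories → Pre_prioritize_hacktoberfest_repos repositories → Spec_prioritize_hacktoberfest_repos repositories (prioritize_hacktoberfest_repos repositories)

-- ===== LEMMAS AND PROOFS =====

-- insertBy walks past a prefix it never inserts before
theorem insertBy_append_of_forall_not_before {α : Type} (before : α → α → Bool) (x : α)
    (F T : List α) (hF : ∀ y ∈ F, before x y = false) :
    PySem.List.insertBy before x (F ++ T) = F ++ PySem.List.insertBy before x T := by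
  induction F with
  | nil => simp
  | cons f fs ih =>
    simp only [List.cons_append, PySem.List.insertBy, hF f (by simp)]
    simp only [Bool.false_eq_true, if_false]
    exact congrArg (f :: ·) (ih (fun y hy => hF y (by simp [hy])))

-- insertion sort on a boolean key, accumulator invariant: falses then trues
theorem sorted_bool_aux {α : Type} (key : α → Bool) (xs F T : List α)
    (hF : ∀ y ∈ F, key y = false) (hT : ∀ y ∈ T, key y = true) :
    xs.foldl (fun acc x => PySem.List.insertBy (fun a b => decide (key a < key b)) x acc) (F ++ T)
      = (F ++ xs.filter (fun x => !key x)) ++ (T ++ xs.filter key) := by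
  induction xs generalizing F T with
  | nil => simp
  | cons x xs ih =>
    simp only [List.foldl_cons]
    by_cases hx : key x = true
    · have h1 : PySem.List.insertBy (fun a b => decide (key a < key b)) x (F ++ T)
          = F ++ (T ++ [x]) := by
        rw [← List.append_assoc]
        exact PySem.List.insertBy_of_forall_not_before _ x (F ++ T)
          (fun y _ => by simp [hx])
      have hT' : ∀ y ∈ T ++ [x], key y = true := by
        intro y hy
        rcases List.mem_append.1 hy with h | h
        · exact hT y h
        · simp at h; simp [h, hx]
      rw [h1, ih F (T ++ [x]) hF hT']
      simp [hx]
    · have hx' : key x = false := by simpa using hx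
      have h2 : PySem.List.insertBy (fun a b => decide (key a < key b)) x T = x :: T := by
        cases T with
        | nil => rfl
        | cons t ts =>
          simp only [PySem.List.insertBy]
          have : key t = true := hT t (by simp)
          simp [hx', this]
      have h1 : PySem.List.insertBy (fun a b => decide (key a < key b)) x (F ++ T)
          = (F ++ [x]) ++ T := by
        rw [insertBy_append_of_forall_not_before _ x F T (fun y hy => by simp [hx', hF y hy]), h2]
        simp
      have hF' : ∀ y ∈ F ++ [x], key y = false := by
        intro y hy
        rcases List.mem_append.1 hy with h | h
        · exact hF y h
        · simp at h; simp [h, hx']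
      rw [h1, ih (F ++ [x]) T hF' hT]
      simp [hx']

theorem sorted_bool {α : Type} (key : α → Bool) (xs : List α) :
    PySem.List.sorted xs key false = xs.filter (fun x => !key x) ++ xs.filter key := by
  have := sorted_bool_aux key xs [] [] (by simp) (by simp)
  simpa [PySem.List.sorted] using this

-- A's pair-accumulator loop computes the two filters
theorem partition_aux (p : List (String × List String) → Bool)
    (xs : List (List (String × List String))) (h o : List (List (String × List String))) :
    xs.foldl (fun acc repo => if p repo then (acc.1 ++ [repo], acc.2) else (acc.1, acc.2 ++ [repo])) (h, o)
      = (h ++ xs.filter p, o ++ xs.filter (fun x => !p x)) := by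
  induction xs generalizing h o with
  | nil => simp
  | cons x xs ih =>
    simp only [List.foldl_cons]
    by_cases hx : p x = true
    · rw [if_pos hx, ih]; simp [hx]
    · rw [if_neg hx]; rw [ih]
      have hx' : p x = false := by simpa using hx
      simp [hx']

-- ===== VERDICT (by name: the statement is the Claim_ definition above) =====
theorem prioritize_hacktoberfest_repos_spec : Claim_equal_prioritize_hacktoberfest_repos := by
  intro repositories _ _
  unfold Spec_prioritize_hacktoberfest_repos
  unfold prioritize_hacktoberfest_repos prioritize_hacktoberfest_repos_alt
  rw [sorted_bool, partition_aux (fun repo => (pvTopics repo).contains "hacktoberfest")]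
  simp
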